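-- pv_equiv track=rewrite | github.com/itdinesh/lotapp-prod | app.py | predict_next_last4
-- ===== SOURCE A (Python) =====
-- def normalize_last4(values, window=60):
--     """
--     Take last `window` LAST4 values, ensure they are 4-digit numeric strings.
--     """
--     tail = values[-window:]
--     norm = []
--     for v in tail:
--         if not v:
--             continue
--         digits = "".join(ch for ch in str(v) if ch.isdigit())
--         if not digits:
--             continue
--         digits = digits[-4:].zfill(4)
--         norm.append(digits)
--     return norm
--
-- def predict_next_last4(history_last4):
--     """
--     Use LAST4 values, treat as ABCD digits, and apply:
--     - raw differences per column
--     - next digit = last_digit + abs(last_raw_diff) (Rule B)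
--     """
--     data = normalize_last4(history_last4, window=60)
--     if len(data) < 2:
--         return ""
--
--     A = [int(v[0]) for v in data]
--     B = [int(v[1]) for v in data]
--     C = [int(v[2]) for v in data]
--     D = [int(v[3]) for v in data]
--
--     def col_diffs(col):
--         raw = [col[i] - col[i - 1] for i in range(1, len(col))]
--         # mod = [(col[i] - col[i - 1]) % 10 for i in range(1, len(col))]
--         return raw
--
--     A_raw = col_diffs(A)
--     B_raw = col_diffs(B)
--     C_raw = col_diffs(C)
--     D_raw = col_diffs(D)
--
--     def next_digit(last_digit, raw_seq):
--         step = abs(raw_seq[-1])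
--         return (last_digit + step) % 10
--
--     A_next = next_digit(A[-1], A_raw)
--     B_next = next_digit(B[-1], B_raw)
--     C_next = next_digit(C[-1], C_raw)
--     D_next = next_digit(D[-1], D_raw)
--
--     return f"{A_next}{B_next}{C_next}{D_next}"
-- ===== SOURCE B (Python) =====
-- def predict_next_last4(history_last4):
--     # Scan the window from the end, keeping only the last two normalized rows,
--     # then compute the four output digits positionally in one small loop.
--     tail = history_last4[-60:]
--     found = []
--     for v in reversed(tail):
--         if not v:
--             continue
--         digits = "".join(ch for ch in v if ch.isdigit())
--         if not digits:
--             continue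
--         found.append(digits[-4:].zfill(4))
--         if len(found) == 2:
--             break
--     if len(found) < 2:
--         return ""
--     last, prev = found[0], found[1]
--     out = []
--     for j in range(4):
--         a = int(last[j])
--         b = int(prev[j])
--         out.append(str((a + abs(a - b)) % 10))
--     return "".join(out)
-- ===== Notes on version B (the rewrite author's own statement) =====
-- stated objective: simpler
-- what changed: Instead of building four full digit columns and four complete diff lists over the whole normalized window, B scans the window backwards, stops as soon as the last two normalized rows are found, and computes the four output digits in one positional loop over those two rows.
import Mathlib
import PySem

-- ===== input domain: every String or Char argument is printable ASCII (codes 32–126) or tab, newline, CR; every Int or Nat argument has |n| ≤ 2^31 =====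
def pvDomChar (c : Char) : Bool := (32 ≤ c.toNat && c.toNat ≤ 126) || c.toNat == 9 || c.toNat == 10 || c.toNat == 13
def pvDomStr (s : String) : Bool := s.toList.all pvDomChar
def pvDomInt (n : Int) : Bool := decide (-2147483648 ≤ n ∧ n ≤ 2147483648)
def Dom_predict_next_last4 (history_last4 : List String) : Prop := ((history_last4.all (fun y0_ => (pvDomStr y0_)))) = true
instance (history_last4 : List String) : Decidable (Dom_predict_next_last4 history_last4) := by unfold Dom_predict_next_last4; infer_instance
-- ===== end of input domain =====

-- B keeps only the last two normalized rows (a single reverse scan with early exit)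
-- and one positional loop, instead of A's four full columns and full diff lists: simpler.

-- ===== PORT A =====
-- strings are handled as List Char via PySem.Chars (exact on the ASCII domain)
def pvNormStep (norm : List (List Char)) (v : String) : List (List Char) :=
  if v.toList = [] then norm                         -- if not v: continue
  else
    let digits := v.toList.filter PySem.Chars.isdigit  -- "".join(ch for ch in str(v) if ch.isdigit())
    if digits = [] then norm                         -- if not digits: continue
    else norm ++ [PySem.Chars.zfill (PySem.List.slice digits (some (-4)) none) 4]  -- digits[-4:].zfill(4)

def normalize_last4 (values : List String) (window : Int) : List (List Char) :=
  (PySem.List.slice values (some (-window)) none).foldl pvNormStep []   -- values[-window:]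

-- int(v[j]) for a string v; the defaults are unreachable on normalize's output (4 digit chars)
def pvIntAt (v : List Char) (j : Int) : Int :=
  match PySem.List.pyGet? v j with
  | some c => (PySem.Int.ofChars? [c]).getD 0
  | none => 0

def pvColDiffs (col : List Int) : List Int :=
  (PySem.List.pyRange 1 (col.length : Int)).map
    (fun i => PySem.List.pyGetD col i 0 - PySem.List.pyGetD col (i - 1) 0)

def pvNextDigit (last_digit : Int) (raw_seq : List Int) : Int :=
  let step := |PySem.List.pyGetD raw_seq (-1) 0|    -- abs(raw_seq[-1]); nonempty whenever called
  PySem.Int.mod (last_digit + step) 10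

def predict_next_last4 (history_last4 : List String) : String :=
  let data := normalize_last4 history_last4 60
  if data.length < 2 then "" else
  let A := data.map (fun v => pvIntAt v 0)
  let B := data.map (fun v => pvIntAt v 1)
  let C := data.map (fun v => pvIntAt v 2)
  let D := data.map (fun v => pvIntAt v 3)
  let A_raw := pvColDiffs A
  let B_raw := pvColDiffs B
  let C_raw := pvColDiffs C
  let D_raw := pvColDiffs D
  let A_next := pvNextDigit (PySem.List.pyGetD A (-1) 0) A_raw
  let B_next := pvNextDigit (PySem.List.pyGetD B (-1) 0) B_raw
  let C_next := pvNextDigit (PySem.List.pyGetD C (-1) 0) C_raw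
  let D_next := pvNextDigit (PySem.List.pyGetD D (-1) 0) D_raw
  PySem.Str.join "" [PySem.Int.toStr A_next, PySem.Int.toStr B_next,
                     PySem.Int.toStr C_next, PySem.Int.toStr D_next]

-- ===== PORT B =====
-- the reverse scan of Source B: collect normalized rows, break as soon as two are found
def pvCollect2 : List String → List (List Char) → List (List Char)
  | [], found => found
  | v :: rest, found =>
    if v.toList = [] then pvCollect2 rest found
    else
      let digits := v.toList.filter PySem.Chars.isdigit
      if digits = [] then pvCollect2 rest found
      else
        let found' := found ++ [PySem.Chars.zfill (PySem.List.slice digits (some (-4)) none) 4]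
        if found'.length = 2 then found' else pvCollect2 rest found'

def predict_next_last4_alt (history_last4 : List String) : String :=
  let tail := PySem.List.slice history_last4 (some (-60)) none
  let found := pvCollect2 tail.reverse []
  if found.length < 2 then "" else
  let last := PySem.List.pyGetD found 0 []   -- found[0]; in range: len(found) = 2 here
  let prev := PySem.List.pyGetD found 1 []   -- found[1]
  let out := (PySem.List.pyRange 0 4).foldl (fun out j =>
      let a := pvIntAt last j
      let b := pvIntAt prev j
      out ++ [PySem.Int.toStr (PySem.Int.mod (a + |a - b|) 10)]) []
  PySem.Str.join "" out

-- ===== PRECONDITION & SPEC =====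
def Spec_predict_next_last4 (history_last4 : List String) (out : String) : Prop := out = predict_next_last4_alt history_last4
instance (history_last4 : List String) (out : String) : Decidable (Spec_predict_next_last4 history_last4 out) := by unfold Spec_predict_next_last4; infer_instance

-- ===== CLAIM (what is proved, stated in full; the proofs are below) =====
def Claim_equal_predict_next_last4 : Prop := ∀ (history_last4 : List String), Dom_predict_next_last4 history_last4 → Spec_predict_next_last4 history_last4 (predict_next_last4 history_last4)

-- ===== LEMMAS AND PROOFS =====

-- the per-row normalization both programs apply, as an Option-valued map
def pvF (v : String) : Option (List Char) :=
  if v.toList = [] then none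
  else
    let digits := v.toList.filter PySem.Chars.isdigit
    if digits = [] then none
    else some (PySem.Chars.zfill (PySem.List.slice digits (some (-4)) none) 4)

lemma pvF_none_of_empty {v : String} (h : v.toList = []) : pvF v = none := by
  simp [pvF, h]

lemma pvF_none_of_nodigits {v : String} (h : v.toList.filter PySem.Chars.isdigit = []) :
    pvF v = none := by
  simp only [pvF, h]
  split_ifs <;> rfl

lemma pvF_some {v : String} (h1 : ¬ v.toList = [])
    (h2 : ¬ v.toList.filter PySem.Chars.isdigit = []) :
    pvF v = some (PySem.Chars.zfill
      (PySem.List.slice (v.toList.filter PySem.Chars.isdigit) (some (-4)) none) 4) := by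
  simp only [pvF, h1, h2, if_false]

lemma foldl_normStep (l : List String) (acc : List (List Char)) :
    l.foldl pvNormStep acc = acc ++ l.filterMap pvF := by
  induction l generalizing acc with
  | nil => simp
  | cons v rest ih =>
    rw [List.foldl_cons, List.filterMap_cons]
    by_cases h1 : v.toList = []
    · rw [pvF_none_of_empty h1, show pvNormStep acc v = acc by simp [pvNormStep, h1]]
      exact ih acc
    · by_cases h2 : v.toList.filter PySem.Chars.isdigit = []
      · rw [pvF_none_of_nodigits h2,
            show pvNormStep acc v = acc by simp [pvNormStep, h1, h2]]
        exact ih acc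
      · rw [pvF_some h1 h2,
            show pvNormStep acc v = acc ++ [PySem.Chars.zfill
              (PySem.List.slice (v.toList.filter PySem.Chars.isdigit) (some (-4)) none) 4]
              by simp [pvNormStep, h1, h2]]
        rw [ih]
        simp

lemma collect2_eq (l : List String) (found : List (List Char)) (h : found.length < 2) :
    pvCollect2 l found = (found ++ l.filterMap pvF).take 2 := by
  induction l generalizing found with
  | nil =>
    rw [pvCollect2, List.filterMap_nil, List.append_nil,
        List.take_of_length_le (by omega)]
  | cons v rest ih =>
    rw [List.filterMap_cons]
    by_cases h1 : v.toList = []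
    · rw [pvF_none_of_empty h1, show pvCollect2 (v :: rest) found = pvCollect2 rest found
            by rw [pvCollect2, if_pos h1]]
      exact ih found h
    · by_cases h2 : v.toList.filter PySem.Chars.isdigit = []
      · rw [pvF_none_of_nodigits h2, show pvCollect2 (v :: rest) found = pvCollect2 rest found
            by rw [pvCollect2, if_neg h1]; simp [h2]]
        exact ih found h
      · rw [pvF_some h1 h2]
        set z := PySem.Chars.zfill
          (PySem.List.slice (v.toList.filter PySem.Chars.isdigit) (some (-4)) none) 4 with hz
        have hstep : pvCollect2 (v :: rest) found =
            if (found ++ [z]).length = 2 then found ++ [z] else pvCollect2 rest (found ++ [z]) := by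
          rw [pvCollect2, if_neg h1]
          simp [h2, ← hz]
        rw [hstep]
        by_cases h3 : (found ++ [z]).length = 2
        · rw [if_pos h3]
          have hf : found.length = 1 := by simp at h3; omega
          match found, hf with
          | [x], _ => simp
        · rw [if_neg h3]
          have hf : found.length = 0 := by simp at h3; omega
          rw [ih _ (by simp [hf])]
          simp

lemma pyRange_one_nat (m : Nat) :
    PySem.List.pyRange 1 (1 + (m : Int)) = (List.range m).map (fun (k : Nat) => 1 + (k : Int)) := by
  simp only [PySem.List.pyRange]
  norm_num
  rcases Nat.eq_zero_or_pos m with h | h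
  · subst h; rfl
  · rw [if_pos h]

-- the last raw diff of a column whose underlying data ends with p, q
lemma colNext (ds : List (List Char)) (p q : List Char) (j : Int) :
    pvNextDigit (PySem.List.pyGetD ((ds ++ [p, q]).map (fun v => pvIntAt v j)) (-1) 0)
        (pvColDiffs ((ds ++ [p, q]).map (fun v => pvIntAt v j)))
      = PySem.Int.mod (pvIntAt q j + |pvIntAt q j - pvIntAt p j|) 10 := by
  set col := (ds ++ [p, q]).map (fun v => pvIntAt v j) with hcol
  have hlen : col.length = ds.length + 2 := by simp [hcol]
  have hget : ∀ (k : Nat) (hk : k < col.length), col.getD k 0 = col[k]'hk := by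
    intro k hk; simp [List.getD_eq_getElem?_getD, List.getElem?_eq_getElem hk]
  -- col[len-1] = pvIntAt q j, col[len-2] = pvIntAt p j
  have hq : col.getD (col.length - 1) 0 = pvIntAt q j := by
    rw [hget _ (by omega)]
    simp [hcol, List.getElem_append_right]
  have hp : col.getD (col.length - 2) 0 = pvIntAt p j := by
    rw [hget _ (by omega)]
    simp [hcol, List.getElem_append_right]
  -- the range [1, len)
  have hrange : PySem.List.pyRange 1 (col.length : Int)
      = (List.range (ds.length + 1)).map (fun (k : Nat) => 1 + (k : Int)) := by
    rw [show ((col.length : Int)) = 1 + ((ds.length + 1 : Nat) : Int) by rw [hlen]; push_cast; ring]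
    exact pyRange_one_nat _
  have hrawlen : (pvColDiffs col).length = ds.length + 1 := by
    simp [pvColDiffs, hrange]
  have hlast : PySem.List.pyGetD (pvColDiffs col) (-1) 0
      = col.getD (col.length - 1) 0 - col.getD (col.length - 2) 0 := by
    rw [show ((-1 : Int)) = -((1 : Nat) : Int) by norm_num,
        PySem.List.pyGetD_neg_natCast _ _ _ (by omega) (by omega)]
    simp only [pvColDiffs, hrange, List.map_map, List.length_map, List.length_range]
    rw [List.getElem_map, List.getElem_range, Function.comp_apply]
    rw [show (1 : Int) + ((ds.length + 1 - 1 : Nat) : Int) = ((ds.length + 1 : Nat) : Int) by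
          rw [Nat.add_sub_cancel]; push_cast; ring]
    rw [show ((ds.length + 1 : Nat) : Int) - 1 = ((ds.length : Nat) : Int) by push_cast; ring]
    rw [PySem.List.pyGetD_natCast, PySem.List.pyGetD_natCast, hlen,
        show ds.length + 2 - 1 = ds.length + 1 by omega,
        show ds.length + 2 - 2 = ds.length by omega]
  have hql : PySem.List.pyGetD col (-1) 0 = pvIntAt q j := by
    rw [show ((-1 : Int)) = -((1 : Nat) : Int) by norm_num,
        PySem.List.pyGetD_neg_natCast _ _ _ (by omega) (by omega)]
    rw [← hget _ (by omega)]; exact hq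
  rw [pvNextDigit, hlast, hql, hq, hp]

-- ===== VERDICT (by name: the statement is the Claim_ definition above) =====
theorem predict_next_last4_spec : Claim_equal_predict_next_last4 := by
  intro hist _
  unfold Spec_predict_next_last4
  simp only [predict_next_last4, predict_next_last4_alt, normalize_last4]
  rw [foldl_normStep, collect2_eq _ _ (by simp), List.filterMap_reverse]
  simp only [List.nil_append]
  set data := (PySem.List.slice hist (some (-60)) none).filterMap pvF with hdata
  by_cases hlen : data.length < 2
  · have hfl : (List.take 2 data.reverse).length < 2 := by
      rw [List.length_take, List.length_reverse]; omega
    rw [if_pos hlen, if_pos hfl]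
  · -- data = ds ++ [p, q]
    obtain ⟨q, p, ds, hds⟩ : ∃ q p ds, data.reverse = q :: p :: ds := by
      match hrev : data.reverse with
      | [] => exfalso; apply hlen
              have h := congrArg List.length hrev
              simp only [List.length_reverse, List.length_nil] at h; omega
      | [x] => exfalso; apply hlen
               have h := congrArg List.length hrev
               simp only [List.length_reverse, List.length_cons, List.length_nil] at h; omega
      | q :: p :: ds => exact ⟨q, p, ds, rfl⟩
    have hdata2 : data = ds.reverse ++ [p, q] := by
      have := congrArg List.reverse hds; simpa using this
    rw [if_neg hlen, if_neg (by simp [hds])]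
    rw [hds]
    simp only [List.take_succ_cons, List.take_zero]
    have h0 : PySem.List.pyGetD [q, p] 0 [] = q := by
      rw [show ((0:Int)) = ((0:Nat):Int) by norm_num, PySem.List.pyGetD_natCast]; rfl
    have h1 : PySem.List.pyGetD [q, p] 1 [] = p := by
      rw [show ((1:Int)) = ((1:Nat):Int) by norm_num, PySem.List.pyGetD_natCast]; rfl
    rw [h0, h1]
    have hr4 : PySem.List.pyRange 0 4 = [0, 1, 2, 3] := by decide
    rw [hr4]
    simp only [List.foldl_cons, List.foldl_nil, List.nil_append, List.append_assoc]
    rw [hdata2]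
    rw [colNext, colNext, colNext, colNext]
    rfl
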